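-- pv_equiv track=rewrite | github.com/snacktavish/COME2022 | backup_results/diff_counter.py | compare_diff_dicts
-- ===== SOURCE A (Python) =====
-- def compare_diff_dicts(diff_dict1, diff_dict2):
--     diffs_matching = 0
--     diffs_not_matching = 0
--     for key in diff_dict1:
--         if key not in diff_dict2:
--             diffs_matching += 1
--         if key in diff_dict2:
--             diffs_not_matching += 1
--     assert diffs_matching+diffs_not_matching == len(diff_dict1)
--     return({'diff_matching':diffs_matching,'diffs_not_matching':diffs_not_matching})
-- ===== SOURCE B (Python) =====
-- def compare_diff_dicts(diff_dict1, diff_dict2):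
--     k1 = set(diff_dict1)
--     k2 = set(diff_dict2)
--     diffs_not_matching = len(k1 & k2)
--     diffs_matching = len(k1 - k2)
--     assert diffs_matching + diffs_not_matching == len(diff_dict1)
--     return {'diff_matching': diffs_matching, 'diffs_not_matching': diffs_not_matching}
-- ===== Notes on version B (the rewrite author's own statement) =====
-- stated objective: idiomatic
-- what changed: Replaces the explicit key-by-key counting loop with two set operations (len(k1 - k2) and len(k1 & k2)) on the key sets, keeping the original (inconsistent) output key names and the assert.
import Mathlib
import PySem

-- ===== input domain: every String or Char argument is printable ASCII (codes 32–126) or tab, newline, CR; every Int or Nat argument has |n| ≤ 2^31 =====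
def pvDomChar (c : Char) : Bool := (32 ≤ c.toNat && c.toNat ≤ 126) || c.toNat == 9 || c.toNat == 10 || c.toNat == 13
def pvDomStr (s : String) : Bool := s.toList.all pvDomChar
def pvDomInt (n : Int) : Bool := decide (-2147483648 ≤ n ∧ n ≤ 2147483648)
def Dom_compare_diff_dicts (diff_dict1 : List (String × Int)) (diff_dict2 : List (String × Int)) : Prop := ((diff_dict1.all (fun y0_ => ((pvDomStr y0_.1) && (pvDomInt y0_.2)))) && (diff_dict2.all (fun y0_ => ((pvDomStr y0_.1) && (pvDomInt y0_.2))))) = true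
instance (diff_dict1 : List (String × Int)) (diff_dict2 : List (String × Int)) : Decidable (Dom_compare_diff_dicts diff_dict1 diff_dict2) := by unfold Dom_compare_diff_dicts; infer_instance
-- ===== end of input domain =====

-- B replaces A's key-by-key counting loop with two set operations (len(k1 - k2), len(k1 & k2)); idiomatic, same cost.


-- ===== PORT A =====
def compare_diff_dicts (diff_dict1 : List (String × Int)) (diff_dict2 : List (String × Int)) : List (String × Int) :=
  -- dict iteration: distinct keys in first-occurrence order; 'key in diff_dict2' tests key membership
  let keys1 := PySem.List.dedup (diff_dict1.map Prod.fst)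
  let keys2 := diff_dict2.map Prod.fst
  let p := keys1.foldl (fun (p : Int × Int) key =>
      let p := if !keys2.contains key then (p.1 + 1, p.2) else p
      let p := if keys2.contains key then (p.1, p.2 + 1) else p
      p) (0, 0)
  [("diff_matching", p.1), ("diffs_not_matching", p.2)]

-- ===== PORT B =====
def compare_diff_dicts_alt (diff_dict1 : List (String × Int)) (diff_dict2 : List (String × Int)) : List (String × Int) :=
  let k1 := PySem.Set.ofList (diff_dict1.map Prod.fst)
  let k2 := PySem.Set.ofList (diff_dict2.map Prod.fst)
  let diffs_not_matching := (PySem.Set.inter k1 k2).length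
  let diffs_matching := (PySem.Set.diff k1 k2).length
  [("diff_matching", (diffs_matching : Int)), ("diffs_not_matching", (diffs_not_matching : Int))]

-- ===== PRECONDITION & SPEC =====
def Spec_compare_diff_dicts (diff_dict1 : List (String × Int)) (diff_dict2 : List (String × Int)) (out : List (String × Int)) : Prop := out = compare_diff_dicts_alt diff_dict1 diff_dict2
instance (diff_dict1 : List (String × Int)) (diff_dict2 : List (String × Int)) (out : List (String × Int)) : Decidable (Spec_compare_diff_dicts diff_dict1 diff_dict2 out) := by unfold Spec_compare_diff_dicts; infer_instance

-- ===== CLAIM (what is proved, stated in full; the proofs are below) =====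
def Claim_equal_compare_diff_dicts : Prop := ∀ (diff_dict1 : List (String × Int)) (diff_dict2 : List (String × Int)), Dom_compare_diff_dicts diff_dict1 diff_dict2 → Spec_compare_diff_dicts diff_dict1 diff_dict2 (compare_diff_dicts diff_dict1 diff_dict2)

-- ===== LEMMAS AND PROOFS =====


theorem pv_fold_count (c : String → Bool) (l : List String) (p : Int × Int) :
    l.foldl (fun (p : Int × Int) key =>
      let p := if !c key then (p.1 + 1, p.2) else p
      let p := if c key then (p.1, p.2 + 1) else p
      p) p
    = (p.1 + ((l.filter (fun k => !c k)).length : Int), p.2 + ((l.filter c).length : Int)) := by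
  induction l generalizing p with
  | nil => simp
  | cons x xs ih =>
    rw [List.foldl_cons, ih, List.filter_cons, List.filter_cons]
    by_cases h : c x = true <;>
      simp [h, Prod.ext_iff] <;> omega

-- ===== VERDICT (by name: the statement is the Claim_ definition above) =====
theorem compare_diff_dicts_spec : Claim_equal_compare_diff_dicts := by
  intro d1 d2 _
  unfold Spec_compare_diff_dicts compare_diff_dicts compare_diff_dicts_alt
  simp only [pv_fold_count, PySem.Set.inter, PySem.Set.diff, PySem.List.dedup_eq_ofList]
  simp only [List.cons.injEq, Prod.mk.injEq, and_true, true_and]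
  constructor <;> ·
    simp only [zero_add]
    norm_cast
    apply congrArg List.length
    apply List.filter_congr
    intro x _
    simp [PySem.Set.contains, PySem.Set.mem_ofList]
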